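-- pv_equiv track=rewrite | github.com/rachgupta/226project | fairness_constraints.py | find_group_equal_score
-- ===== SOURCE A (Python) =====
-- def find_group_equal_score(group_costs):
--     max_score = 0
--     for i in range(6):
--         for j in range(6):
--             score = abs(group_costs[i]-group_costs[j])
--             if score > max_score:
--                 max_score = score
--     return max_score
-- ===== SOURCE B (Python) =====
-- def find_group_equal_score(group_costs):
--     vals = [group_costs[i] for i in range(6)]
--     return max(vals) - min(vals)
-- ===== Notes on version B (the rewrite author's own statement) =====
-- stated objective: simpler
-- what changed: Replaces the 6x6 nested loop over all pairwise absolute differences with a single extremal pass: max of the first six values minus their min.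
import Mathlib
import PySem

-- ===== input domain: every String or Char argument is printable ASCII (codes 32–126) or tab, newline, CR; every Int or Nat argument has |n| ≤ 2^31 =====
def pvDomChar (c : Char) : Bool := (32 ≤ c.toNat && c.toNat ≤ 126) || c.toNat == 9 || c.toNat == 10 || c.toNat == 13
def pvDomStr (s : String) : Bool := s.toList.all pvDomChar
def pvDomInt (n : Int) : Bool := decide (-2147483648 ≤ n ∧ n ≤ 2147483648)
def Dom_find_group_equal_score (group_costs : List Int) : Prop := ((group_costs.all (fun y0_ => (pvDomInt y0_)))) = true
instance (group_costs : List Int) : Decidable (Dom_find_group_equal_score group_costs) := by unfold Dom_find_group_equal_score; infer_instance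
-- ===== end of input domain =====

-- B replaces A's 6x6 nested loop over all pairwise absolute differences by a single
-- extremal pass: max of the six values minus their min (same value, simpler shape).


-- ===== PORT A =====
def find_group_equal_score (group_costs : List Int) : Int :=
  (PySem.List.pyRange 0 6 1).foldl (fun max_score i =>
    (PySem.List.pyRange 0 6 1).foldl (fun max_score j =>
      let score := |PySem.List.pyGetD group_costs i 0 - PySem.List.pyGetD group_costs j 0|
      if score > max_score then score else max_score) max_score) 0

-- ===== PORT B =====
def find_group_equal_score_alt (group_costs : List Int) : Int :=
  let vals := (PySem.List.pyRange 0 6 1).map (fun i => PySem.List.pyGetD group_costs i 0)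
  (PySem.List.max? vals (fun y => y)).getD 0 - (PySem.List.min? vals (fun y => y)).getD 0

-- ===== PRECONDITION & SPEC =====
-- Pre_ excludes exactly the inputs with fewer than 6 elements, on which the Python A
-- (and the Python B) raise IndexError.
def Pre_find_group_equal_score (group_costs : List Int) : Prop := 6 ≤ group_costs.length
instance (group_costs : List Int) : Decidable (Pre_find_group_equal_score group_costs) := by unfold Pre_find_group_equal_score; infer_instance
def pvWitness_find_group_equal_score : List Int := [3, -1, 4, 1, -5, 9]
def Spec_find_group_equal_score (group_costs : List Int) (out : Int) : Prop := out = find_group_equal_score_alt group_costs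
instance (group_costs : List Int) (out : Int) : Decidable (Spec_find_group_equal_score group_costs out) := by unfold Spec_find_group_equal_score; infer_instance

-- ===== CLAIM (what is proved, stated in full; the proofs are below) =====
def Claim_equal_find_group_equal_score : Prop := ∀ (group_costs : List Int), Dom_find_group_equal_score group_costs → Pre_find_group_equal_score group_costs → Spec_find_group_equal_score group_costs (find_group_equal_score group_costs)

-- ===== LEMMAS AND PROOFS =====

-- A's conditional update is a max.
theorem if_gt_eq_max (m s : Int) : (if s > m then s else m) = max m s := by omega

theorem foldl_max_le_of (l : List Int) (init c : Int) (h0 : init ≤ c)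
    (h : ∀ z ∈ l, z ≤ c) : l.foldl max init ≤ c := by
  induction l generalizing init with
  | nil => simpa using h0
  | cons x t ih =>
    simp only [List.foldl_cons]
    exact ih _ (by have := h x (by simp); omega) (fun z hz => h z (by simp [hz]))

-- The nested pairwise-max loop equals max − min of the values.
theorem pairmax_eq (L : List Int) (g : Int → Int) (M m : Int)
    (hM : PySem.List.max? (L.map g) (fun y => y) = some M)
    (hm : PySem.List.min? (L.map g) (fun y => y) = some m) :
    L.foldl (fun ms i => L.foldl (fun ms j => max ms |g i - g j|) ms) 0 = M - m := by
  have hMmem := PySem.List.max?_mem hM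
  have hmmem := PySem.List.min?_mem hm
  have hMmax := PySem.List.max?_isMax hM
  have hmmin := PySem.List.min?_isMin hm
  have hkey : L.foldl (fun ms i => L.foldl (fun ms j => max ms |g i - g j|) ms) 0
      = List.foldl max 0 ((L.map (fun i => L.map (fun j => |g i - g j|))).flatten) := by
    simp only [List.foldl_flatten, List.foldl_map]
  rw [hkey]
  apply le_antisymm
  · apply foldl_max_le_of
    · have := hmmin M hMmem; omega
    · intro z hz
      obtain ⟨l, hl, hzl⟩ := List.mem_flatten.mp hz
      obtain ⟨i, hi, rfl⟩ := List.mem_map.mp hl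
      obtain ⟨j, hj, rfl⟩ := List.mem_map.mp hzl
      have hgi : g i ∈ L.map g := List.mem_map.mpr ⟨i, hi, rfl⟩
      have hgj : g j ∈ L.map g := List.mem_map.mpr ⟨j, hj, rfl⟩
      rw [abs_sub_le_iff]
      have h1 := hMmax (g i) hgi
      have h2 := hMmax (g j) hgj
      have h3 := hmmin (g i) hgi
      have h4 := hmmin (g j) hgj
      constructor <;> omega
  · obtain ⟨iM, hiM, hgiM⟩ := List.mem_map.mp hMmem
    obtain ⟨im, him, hgim⟩ := List.mem_map.mp hmmem
    have hmemp : |g iM - g im| ∈ (L.map (fun i => L.map (fun j => |g i - g j|))).flatten :=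
      List.mem_flatten.mpr ⟨L.map (fun j => |g iM - g j|),
        List.mem_map.mpr ⟨iM, hiM, rfl⟩, List.mem_map.mpr ⟨im, him, rfl⟩⟩
    have hle := (PySem.List.le_foldl_max ((L.map (fun i => L.map (fun j => |g i - g j|))).flatten) 0).2
      _ hmemp
    have habs := le_abs_self (g iM - g im)
    omega

-- ===== VERDICT (by name: the statement is the Claim_ definition above) =====
theorem find_group_equal_score_spec : Claim_equal_find_group_equal_score := by
  intro gc _ _
  unfold Spec_find_group_equal_score
  simp only [find_group_equal_score_alt]
  have hrange : PySem.List.pyRange 0 6 1 = [0, 1, 2, 3, 4, 5] := by decide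
  set g : Int → Int := fun i => PySem.List.pyGetD gc i 0 with hg
  have hM : PySem.List.max? ((PySem.List.pyRange 0 6 1).map g) (fun y => y)
      = some (List.foldl max (g 0) [g 1, g 2, g 3, g 4, g 5]) := by
    rw [hrange]; exact PySem.List.max?_id_cons _ _
  have hm : PySem.List.min? ((PySem.List.pyRange 0 6 1).map g) (fun y => y)
      = some (List.foldl min (g 0) [g 1, g 2, g 3, g 4, g 5]) := by
    rw [hrange]; exact PySem.List.min?_id_cons _ _
  have hA : find_group_equal_score gc
      = (PySem.List.pyRange 0 6 1).foldl
          (fun ms i => (PySem.List.pyRange 0 6 1).foldl (fun ms j => max ms |g i - g j|) ms) 0 := by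
    simp only [find_group_equal_score, if_gt_eq_max, hg]
  rw [hM, hm, Option.getD_some, Option.getD_some, hA, pairmax_eq _ g _ _ hM hm]
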